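-- pv_equiv track=rewrite | github.com/amishra527/RAG-s | CM_BI_1.py | fix_markdown_tables
-- ===== SOURCE A (Python) =====
-- def fix_markdown_tables(text):
--     """Ensure tables are formatted correctly for Markdown."""
--     lines = text.split("\n")
--     new_lines = []
--     inside_table = False
--
--     for line in lines:
--         if "|" in line:  # Detect table rows
--             if not inside_table:
--                 inside_table = True
--                 # Add header formatting if missing
--                 new_lines.append(line)
--                 new_lines.append("|---" * (line.count("|") - 1) + "|")
--             else:
--                 new_lines.append(line)
--         else:
--             inside_table = False
--             new_lines.append(line)
--
--     return "\n".join(new_lines)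
-- ===== SOURCE B (Python) =====
-- def fix_markdown_tables(text):
--     """Ensure tables are formatted correctly for Markdown."""
--     lines = text.split("\n")
--     out = []
--     i = 0
--     n = len(lines)
--     while i < n:
--         key = "|" in lines[i]
--         j = i + 1
--         while j < n and ("|" in lines[j]) == key:
--             j += 1
--         run = lines[i:j]
--         if key:
--             first = run[0]
--             out.append(first)
--             out.append("|---" * (first.count("|") - 1) + "|")
--             out.extend(run[1:])
--         else:
--             out.extend(run)
--         i = j
--     return "\n".join(out)
-- ===== Notes on version B (the rewrite author's own statement) =====
-- stated objective: alternative
-- what changed: Replaces the per-line inside_table flag scan with explicit block grouping: two-index scanning finds each maximal run of lines with equal pipe-membership, then each table run is emitted as first line, separator row, rest, and each non-table run verbatim.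
import Mathlib
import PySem

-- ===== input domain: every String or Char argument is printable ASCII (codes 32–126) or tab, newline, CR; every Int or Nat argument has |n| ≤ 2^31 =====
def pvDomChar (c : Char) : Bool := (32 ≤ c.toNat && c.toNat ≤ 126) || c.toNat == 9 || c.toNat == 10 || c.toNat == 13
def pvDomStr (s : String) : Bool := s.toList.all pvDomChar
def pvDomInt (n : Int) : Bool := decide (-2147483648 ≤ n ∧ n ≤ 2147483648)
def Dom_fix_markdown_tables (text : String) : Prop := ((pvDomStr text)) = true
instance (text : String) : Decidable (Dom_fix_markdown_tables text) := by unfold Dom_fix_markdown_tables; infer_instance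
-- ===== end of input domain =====

-- B replaces A's per-line inside_table flag with explicit grouping of lines into maximal
-- runs of equal pipe-membership, emitting each run as a block (alternative decomposition, same cost).

-- text.split("\n"): PySem.Str.split? is some for the nonempty separator "\n"; getD is never reached
def pvLines (text : String) : List String := (PySem.Str.split? text "\n").getD []

-- separator row "|---" * (line.count("|") - 1) + "|" (both Pythons build it with this same expression;
-- Python's  str * n  with n ≥ 0 is the concatenation of n copies, exact here since count ≥ 1 in the branch)
def pvSepRow (line : String) : String :=
  PySem.Str.join "" (List.replicate (PySem.Str.count line "|" - 1) "|---" ++ ["|"])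

-- ===== PORT A =====
def fix_markdown_tables (text : String) : String :=
  let lines := pvLines text
  let st := lines.foldl (fun (st : Bool × List String) line =>
    if PySem.Str.isIn "|" line then
      if !st.1 then (true, st.2 ++ [line, pvSepRow line])
      else (true, st.2 ++ [line])
    else (false, st.2 ++ [line])) (false, [])
  PySem.Str.join "\n" st.2

-- ===== PORT B =====
-- the inner while loop advancing j while lines[j] keeps the key, then the slices
-- lines[i:j] / run[1:]: ported as takeWhile / dropWhile on the suffix (exact)
def pvRunsB (lines : List String) : List (List String) :=
  match lines with
  | [] => []
  | l :: rest =>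
    let k := PySem.Str.isIn "|" l
    (l :: rest.takeWhile (fun x => PySem.Str.isIn "|" x == k)) ::
      pvRunsB (rest.dropWhile (fun x => PySem.Str.isIn "|" x == k))
termination_by lines.length
decreasing_by
  simp only [List.length_cons]
  exact Nat.lt_succ_of_le (List.length_dropWhile_le _ _)

def pvEmitB (run : List String) : List String :=
  match run with
  | [] => []
  | first :: rest =>
    if PySem.Str.isIn "|" first then first :: pvSepRow first :: rest
    else first :: rest

def fix_markdown_tables_alt (text : String) : String :=
  PySem.Str.join "\n" ((pvRunsB (pvLines text)).flatMap pvEmitB)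

-- ===== PRECONDITION & SPEC =====
def Spec_fix_markdown_tables (text : String) (out : String) : Prop := out = fix_markdown_tables_alt text
instance (text : String) (out : String) : Decidable (Spec_fix_markdown_tables text out) := by unfold Spec_fix_markdown_tables; infer_instance

-- ===== CLAIM (what is proved, stated in full; the proofs are below) =====
def Claim_equal_fix_markdown_tables : Prop := ∀ (text : String), Dom_fix_markdown_tables text → Spec_fix_markdown_tables text (fix_markdown_tables text)

-- ===== LEMMAS AND PROOFS =====

-- recursive characterisation of A's flag loop
def pvLoopA (inside : Bool) (lines : List String) : List String :=
  match lines with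
  | [] => []
  | l :: rest =>
    if PySem.Str.isIn "|" l then
      if inside then l :: pvLoopA true rest
      else l :: pvSepRow l :: pvLoopA true rest
    else l :: pvLoopA false rest

theorem pvFoldlA_eq (lines : List String) : ∀ (inside : Bool) (acc : List String),
    (lines.foldl (fun (st : Bool × List String) line =>
      if PySem.Str.isIn "|" line then
        if !st.1 then (true, st.2 ++ [line, pvSepRow line])
        else (true, st.2 ++ [line])
      else (false, st.2 ++ [line])) (inside, acc)).2 = acc ++ pvLoopA inside lines := by
  induction lines with
  | nil => intro inside acc; simp [pvLoopA]
  | cons l rest ih =>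
    intro inside acc
    simp at ih
    simp only [List.foldl_cons, pvLoopA]
    by_cases h : PySem.Chars.isIn ['|'] l.toList = true
    · cases inside <;> simp [h, ih]
    · simp only [Bool.not_eq_true] at h
      simp [h, ih]

theorem pvLoopA_true (lines : List String) :
    pvLoopA true lines =
      lines.takeWhile (fun x => PySem.Chars.isIn ['|'] x.toList) ++
        pvLoopA false (lines.dropWhile (fun x => PySem.Chars.isIn ['|'] x.toList)) := by
  induction lines with
  | nil => simp [pvLoopA]
  | cons l rest ih =>
    by_cases h : PySem.Chars.isIn ['|'] l.toList = true
    · simp [pvLoopA, h, ih]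
    · simp only [Bool.not_eq_true] at h
      simp [pvLoopA, h]

theorem pvLoopA_false_run (lines : List String) :
    pvLoopA false lines =
      lines.takeWhile (fun x => !PySem.Chars.isIn ['|'] x.toList) ++
        pvLoopA false (lines.dropWhile (fun x => !PySem.Chars.isIn ['|'] x.toList)) := by
  induction lines with
  | nil => simp [pvLoopA]
  | cons l rest ih =>
    by_cases h : PySem.Chars.isIn ['|'] l.toList = true
    · simp [pvLoopA, h]
    · simp only [Bool.not_eq_true] at h
      simp [pvLoopA, h, ih]

theorem pvMain (lines : List String) :
    pvLoopA false lines = (pvRunsB lines).flatMap pvEmitB := by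
  induction hn : lines.length using Nat.strong_induction_on generalizing lines with
  | _ n ih =>
  subst hn
  match lines with
  | [] => simp [pvLoopA, pvRunsB]
  | l :: rest =>
    rw [pvRunsB]
    by_cases h : PySem.Chars.isIn ['|'] l.toList = true
    · have key := ih (rest.dropWhile (fun x => PySem.Chars.isIn ['|'] x.toList)).length
        (by simp only [List.length_cons]
            exact Nat.lt_succ_of_le (List.length_dropWhile_le _ _))
        _ rfl
      simp [pvLoopA, pvEmitB, h, pvLoopA_true, key]
    · simp only [Bool.not_eq_true] at h
      have key := ih (rest.dropWhile (fun x => !PySem.Chars.isIn ['|'] x.toList)).length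
        (by simp only [List.length_cons]
            exact Nat.lt_succ_of_le (List.length_dropWhile_le _ _))
        _ rfl
      simp [pvLoopA, pvEmitB, h, pvLoopA_false_run, key]

-- ===== VERDICT (by name: the statement is the Claim_ definition above) =====
theorem fix_markdown_tables_spec : Claim_equal_fix_markdown_tables := by
  intro text _
  unfold Spec_fix_markdown_tables fix_markdown_tables fix_markdown_tables_alt
  simp only [pvFoldlA_eq, List.nil_append, pvMain]
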